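-- pv_equiv track=rewrite | github.com/itepastra/AQA | main.py | gate_combinations_sub
-- ===== SOURCE A (Python) =====
-- def gate_combinations_sub(qubits: int, previous_layer: tuple[int]):
--     if qubits == 0:
--         yield ()
--     else:
--         for combination in gate_combinations_sub(qubits - 1, previous_layer):
--             yield combination + (0,)
--             if previous_layer[qubits - 1] != 1:
--                 yield combination + (1,)
--             if previous_layer[qubits - 1] != 2:
--                 yield combination + (2,)
--             for offset in range(1, len(combination) + 1):
--                 if (
--                     combination[-offset] == 0
--                     and all(
--                         combination[-offset + o] != o + 2 for o in range(1, offset + 1)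
--                     )
--                     and previous_layer[qubits - 1] != offset + 2
--                 ):
--                     yield combination + (offset + 2,)
-- ===== SOURCE B (Python) =====
-- def gate_combinations_sub(qubits: int, previous_layer: tuple[int]):
--     # Iterative worklist instead of recursion: build the level-i partial tuples
--     # from the level-(i-1) ones, reading previous_layer[i] once per level.
--     combos = [()]
--     for i in range(qubits):
--         p = previous_layer[i]
--         nxt = []
--         for c in combos:
--             values = [0]
--             if p != 1:
--                 values.append(1)
--             if p != 2:
--                 values.append(2)
--             for offset in range(1, len(c) + 1):
--                 if (c[-offset] == 0
--                         and all(c[-offset + o] != o + 2 for o in range(1, offset + 1))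
--                         and p != offset + 2):
--                     values.append(offset + 2)
--             nxt.extend(c + (v,) for v in values)
--         combos = nxt
--     yield from combos
-- ===== Notes on version B (the rewrite author's own statement) =====
-- stated objective: alternative
-- what changed: Replaces the recursive generator with an iterative worklist that grows the list of partial tuples level by level, reading previous_layer[i] once per level and collecting the valid extension values per partial tuple before extending; Pre_ excludes only inputs where A raises (negative qubits: RecursionError; qubits > len(previous_layer): IndexError).
import Mathlib
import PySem

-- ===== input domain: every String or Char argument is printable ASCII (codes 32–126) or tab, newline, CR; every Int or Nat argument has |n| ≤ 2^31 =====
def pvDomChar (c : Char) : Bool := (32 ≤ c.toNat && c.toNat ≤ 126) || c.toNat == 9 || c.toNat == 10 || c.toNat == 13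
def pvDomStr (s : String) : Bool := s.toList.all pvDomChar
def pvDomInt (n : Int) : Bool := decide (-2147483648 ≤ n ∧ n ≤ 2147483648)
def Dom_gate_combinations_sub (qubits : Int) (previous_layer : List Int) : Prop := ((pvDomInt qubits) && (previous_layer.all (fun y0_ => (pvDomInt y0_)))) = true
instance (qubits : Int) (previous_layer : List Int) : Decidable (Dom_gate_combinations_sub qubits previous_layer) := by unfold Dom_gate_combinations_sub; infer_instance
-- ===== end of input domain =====

-- B is an iterative worklist (level-by-level) re-implementation of A's recursive generator; the
-- equivalence is about the fully consumed sequence of yielded tuples (exception timing under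
-- partial consumption outside Pre_ is not modelled).

-- ===== PORT A =====
-- A's recursion on qubits, one level per call; pyGetD is exact under Pre_ (index in range).
def gateAuxA (n : Nat) (previous_layer : List Int) : List (List Int) :=
  match n with
  | 0 => [[]]
  | Nat.succ m =>
    (gateAuxA m previous_layer).flatMap (fun c =>
      let p := PySem.List.pyGetD previous_layer (m : Int) 99
      [c ++ [0]]
      ++ (if p ≠ 1 then [c ++ [1]] else [])
      ++ (if p ≠ 2 then [c ++ [2]] else [])
      ++ (PySem.List.pyRange 1 ((c.length : Int) + 1) 1).flatMap (fun off =>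
          if PySem.List.pyGetD c (-off) 99 == 0
             && (PySem.List.pyRange 1 (off + 1) 1).all
                  (fun o => PySem.List.pyGetD c (-off + o) 99 != o + 2)
             && p != off + 2
          then [c ++ [off + 2]] else []))

def gate_combinations_sub (qubits : Int) (previous_layer : List Int) : List (List Int) :=
  gateAuxA qubits.toNat previous_layer

-- ===== PORT B =====
-- the list `values` of valid extension values for partial tuple c under previous-layer value p
def gateValuesB (p : Int) (c : List Int) : List Int :=
  [0]
  ++ (if p ≠ 1 then [1] else [])
  ++ (if p ≠ 2 then [2] else [])
  ++ (PySem.List.pyRange 1 ((c.length : Int) + 1) 1).flatMap (fun off =>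
      if PySem.List.pyGetD c (-off) 99 == 0
         && (PySem.List.pyRange 1 (off + 1) 1).all
              (fun o => PySem.List.pyGetD c (-off + o) 99 != o + 2)
         && p != off + 2
      then [off + 2] else [])

def gate_combinations_sub_alt (qubits : Int) (previous_layer : List Int) : List (List Int) :=
  (List.range qubits.toNat).foldl
    (fun (combos : List (List Int)) (i : Nat) =>
      let p := PySem.List.pyGetD previous_layer (i : Int) 99
      combos.flatMap (fun c => (gateValuesB p c).map (fun v => c ++ [v])))
    [[]]

-- ===== PRECONDITION & SPEC =====
-- Pre_ excludes exactly the inputs where A raises: negative qubits (RecursionError) and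
-- qubits > len(previous_layer) (IndexError).
def Pre_gate_combinations_sub (qubits : Int) (previous_layer : List Int) : Prop :=
  0 ≤ qubits ∧ qubits ≤ (previous_layer.length : Int)
instance (qubits : Int) (previous_layer : List Int) : Decidable (Pre_gate_combinations_sub qubits previous_layer) := by unfold Pre_gate_combinations_sub; infer_instance
def pvWitness_gate_combinations_sub : Int × List Int := (2, [0, 3])
def Spec_gate_combinations_sub (qubits : Int) (previous_layer : List Int) (out : List (List Int)) : Prop := out = gate_combinations_sub_alt qubits previous_layer
instance (qubits : Int) (previous_layer : List Int) (out : List (List Int)) : Decidable (Spec_gate_combinations_sub qubits previous_layer out) := by unfold Spec_gate_combinations_sub; infer_instance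

-- ===== CLAIM (what is proved, stated in full; the proofs are below) =====
def Claim_equal_gate_combinations_sub : Prop := ∀ (qubits : Int) (previous_layer : List Int), Dom_gate_combinations_sub qubits previous_layer → Pre_gate_combinations_sub qubits previous_layer → Spec_gate_combinations_sub qubits previous_layer (gate_combinations_sub qubits previous_layer)

-- ===== LEMMAS AND PROOFS =====

-- A's per-combination yields at one level = B's extension values mapped onto the combination
theorem gate_step_eq (p : Int) (c : List Int) :
    [c ++ [0]]
    ++ (if p ≠ 1 then [c ++ [1]] else [])
    ++ (if p ≠ 2 then [c ++ [2]] else [])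
    ++ (PySem.List.pyRange 1 ((c.length : Int) + 1) 1).flatMap (fun off =>
        if PySem.List.pyGetD c (-off) 99 == 0
           && (PySem.List.pyRange 1 (off + 1) 1).all
                (fun o => PySem.List.pyGetD c (-off + o) 99 != o + 2)
           && p != off + 2
        then [c ++ [off + 2]] else [])
    = (gateValuesB p c).map (fun v => c ++ [v]) := by
  simp only [gateValuesB, List.map_append, List.map_flatMap, apply_ite (List.map (fun v => c ++ [v]))]
  simp

-- A's recursion and B's fold build the same levels
theorem gate_levels_eq (n : Nat) (previous_layer : List Int) :
    gateAuxA n previous_layer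
      = (List.range n).foldl
          (fun (combos : List (List Int)) (i : Nat) =>
            let p := PySem.List.pyGetD previous_layer (i : Int) 99
            combos.flatMap (fun c => (gateValuesB p c).map (fun v => c ++ [v])))
          [[]] := by
  induction n with
  | zero => simp [gateAuxA]
  | succ m ih =>
    rw [List.range_succ, List.foldl_append, ← ih]
    simp only [gateAuxA, List.foldl_cons, List.foldl_nil]
    congr 1
    funext c
    exact gate_step_eq _ c

-- ===== VERDICT (by name: the statement is the Claim_ definition above) =====
theorem gate_combinations_sub_spec : Claim_equal_gate_combinations_sub := by
  intro qubits previous_layer _ _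
  unfold Spec_gate_combinations_sub gate_combinations_sub gate_combinations_sub_alt
  exact gate_levels_eq _ _
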